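-- pv_equiv track=rewrite | github.com/YoarashiYume/MapReduce | Algorithm/File/TF_IDF.py | __docWordCounter
-- ===== SOURCE A (Python) =====
-- from typing import List, Tuple
--
-- def __docWordCounter(docInfo: List[tuple]) -> dict:
--     elList = list(docInfo)
--     wordCount = {}
--     for el in elList:
--         count = sum(list(map(lambda value: value[1], filter(lambda value: value[0] == el[0], elList))))
--         if not el[0] in wordCount:
--             wordCount[el[0]] = count
--     return wordCount
-- ===== SOURCE B (Python) =====
-- def __docWordCounter(docInfo):
--     wordCount = {}
--     for key, cnt in docInfo:
--         wordCount[key] = wordCount.get(key, 0) + cnt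
--     return wordCount
-- ===== Notes on version B (the rewrite author's own statement) =====
-- stated objective: faster
-- what changed: Replaces A's per-element re-scan of the whole list (filter+sum for every element) with a single pass that accumulates each key's running sum in a dict.
import Mathlib
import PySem

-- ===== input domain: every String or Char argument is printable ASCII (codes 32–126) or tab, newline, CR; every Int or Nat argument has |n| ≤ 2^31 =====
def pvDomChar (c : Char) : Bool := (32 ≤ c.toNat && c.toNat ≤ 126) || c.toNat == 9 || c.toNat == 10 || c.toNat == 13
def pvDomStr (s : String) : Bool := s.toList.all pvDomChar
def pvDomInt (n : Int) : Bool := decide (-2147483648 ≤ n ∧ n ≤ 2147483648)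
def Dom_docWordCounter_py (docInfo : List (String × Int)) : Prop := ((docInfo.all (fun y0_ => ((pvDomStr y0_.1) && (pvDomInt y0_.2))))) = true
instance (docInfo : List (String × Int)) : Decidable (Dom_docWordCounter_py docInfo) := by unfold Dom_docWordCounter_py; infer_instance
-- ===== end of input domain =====

-- B replaces A's quadratic per-element re-scan (filter + sum over the whole list for every element)
-- with a single accumulating pass over the list; same result dict, including first-occurrence key order.

-- ===== PORT A =====
def docWordCounter_py (docInfo : List (String × Int)) : List (String × Int) :=
  let elList := docInfo
  (elList.foldl (fun wordCount el =>
      let count := ((elList.filter (fun value => value.1 == el.1)).map (fun value => value.2)).sum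
      if !(PySem.Dict.contains wordCount el.1) then PySem.Dict.insert wordCount el.1 count
      else wordCount)
    PySem.Dict.empty).items

-- ===== PORT B =====
def docWordCounter_py_alt (docInfo : List (String × Int)) : List (String × Int) :=
  (docInfo.foldl (fun wordCount p =>
      PySem.Dict.insert wordCount p.1 (PySem.Dict.getD wordCount p.1 0 + p.2))
    PySem.Dict.empty).items

-- ===== PRECONDITION & SPEC =====
def Spec_docWordCounter_py (docInfo : List (String × Int)) (out : List (String × Int)) : Prop := out = docWordCounter_py_alt docInfo
instance (docInfo : List (String × Int)) (out : List (String × Int)) : Decidable (Spec_docWordCounter_py docInfo out) := by unfold Spec_docWordCounter_py; infer_instance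

-- ===== CLAIM (what is proved, stated in full; the proofs are below) =====
def Claim_equal_docWordCounter_py : Prop := ∀ (docInfo : List (String × Int)), Dom_docWordCounter_py docInfo → Spec_docWordCounter_py docInfo (docWordCounter_py docInfo)

-- ===== LEMMAS AND PROOFS =====

-- the total count of key k over a list
def pvTotal (full : List (String × Int)) (k : String) : Int :=
  ((full.filter (fun value => value.1 == k)).map (fun value => value.2)).sum

-- B's loop: getD of the accumulated dict is the running sum
lemma B_getD (l : List (String × Int)) (d : PySem.Dict String Int) (k : String) :
    (l.foldl (fun wordCount p =>
        PySem.Dict.insert wordCount p.1 (PySem.Dict.getD wordCount p.1 0 + p.2)) d).getD k 0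
      = d.getD k 0 + pvTotal l k := by
  induction l generalizing d with
  | nil => simp [pvTotal]
  | cons p t ih =>
    simp only [List.foldl_cons, ih]
    rw [PySem.Dict.getD_insert]
    by_cases h : k = p.1
    · rw [if_pos h]; subst h
      simp [pvTotal]
      ring
    · rw [if_neg h]
      have hne : (p.1 == k) = false := by simp [Ne.symm h]
      simp [pvTotal, hne]

-- A's loop: lookup in the accumulated dict
lemma A_get? (full : List (String × Int)) (l : List (String × Int))
    (d : PySem.Dict String Int) (k : String) :
    (l.foldl (fun wordCount el =>
        if !(PySem.Dict.contains wordCount el.1) then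
          PySem.Dict.insert wordCount el.1
            (((full.filter (fun value => value.1 == el.1)).map (fun value => value.2)).sum)
        else wordCount) d).get? k
      = if d.contains k then d.get? k
        else if k ∈ l.map (fun p => p.1) then some (pvTotal full k) else none := by
  induction l generalizing d with
  | nil =>
    by_cases h : d.contains k = true
    · simp [h]
    · simp [h, PySem.Dict.get?_eq_none_iff_contains]
  | cons el t ih =>
    simp only [List.foldl_cons, List.map_cons, List.mem_cons]
    by_cases hc : d.contains el.1 = true
    · rw [if_neg (by simp [hc])]
      rw [ih]
      by_cases hk : d.contains k = true
      · simp [hk]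
      · have hne : k ≠ el.1 := fun he => hk (he ▸ hc)
        simp [hk, hne]
        by_cases hm : k ∈ List.map (fun p => p.1) t
        · simp [hm]
        · simp [hm, hne]
    · rw [if_pos (by simp [hc])]
      rw [ih]
      by_cases hk : k = el.1
      · subst hk
        simp [PySem.Dict.contains_insert_self, PySem.Dict.get?_insert_self, pvTotal, hc]
      · have h1 : (d.insert el.1 (((full.filter (fun value => value.1 == el.1)).map (fun value => value.2)).sum)).contains k = d.contains k := by
          simp [PySem.Dict.contains_insert, hk]
        rw [h1, PySem.Dict.get?_insert_of_ne _ _ hk]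
        by_cases hdk : d.contains k = true
        · simp [hdk]
        · simp only [hdk]
          by_cases hm : k ∈ List.map (fun p => p.1) t
          · simp [hm]
          · simp [hm, hk]

-- keys of A's loop
lemma A_keys (full : List (String × Int)) (l : List (String × Int))
    (d : PySem.Dict String Int) :
    (l.foldl (fun wordCount el =>
        if !(PySem.Dict.contains wordCount el.1) then
          PySem.Dict.insert wordCount el.1
            (((full.filter (fun value => value.1 == el.1)).map (fun value => value.2)).sum)
        else wordCount) d).keys
      = PySem.Set.update d.keys (l.map (fun p => p.1)) := by
  induction l generalizing d with
  | nil => simp [PySem.Set.update_nil]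
  | cons el t ih =>
    simp only [List.foldl_cons, List.map_cons, PySem.Set.update_cons]
    by_cases hc : d.contains el.1 = true
    · rw [if_neg (by simp [hc]), ih]
      have : PySem.Set.add d.keys el.1 = d.keys :=
        PySem.Set.add_of_mem ((PySem.Dict.contains_iff_mem_keys d el.1).mp hc)
      rw [this]
    · rw [if_pos (by simp [hc]), ih]
      rw [PySem.Dict.keys_insert_of_not_contains _ _ (by simpa using hc)]
      have : PySem.Set.add d.keys el.1 = d.keys ++ [el.1] :=
        PySem.Set.add_of_not_mem (fun hm => hc ((PySem.Dict.contains_iff_mem_keys d el.1).mpr hm))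
      rw [this]

-- nodup of A's keys
lemma A_keys_nodup (full l : List (String × Int)) :
    ((l.foldl (fun wordCount el =>
        if !(PySem.Dict.contains wordCount el.1) then
          PySem.Dict.insert wordCount el.1
            (((full.filter (fun value => value.1 == el.1)).map (fun value => value.2)).sum)
        else wordCount) PySem.Dict.empty).keys).Nodup := by
  rw [A_keys]
  exact PySem.Set.nodup_update _ _ (by simp [PySem.Dict.keys_empty])

-- ===== VERDICT (by name: the statement is the Claim_ definition above) =====
theorem docWordCounter_py_spec : Claim_equal_docWordCounter_py := by
  intro docInfo _
  unfold Spec_docWordCounter_py docWordCounter_py docWordCounter_py_alt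
  have hBkeys : (docInfo.foldl (fun wordCount p =>
      PySem.Dict.insert wordCount p.1 (PySem.Dict.getD wordCount p.1 0 + p.2))
      PySem.Dict.empty).keys
      = PySem.Set.update (PySem.Dict.empty : PySem.Dict String Int).keys
          (docInfo.map (fun p => p.1)) := by
    exact PySem.Dict.keys_foldl_insert_key docInfo (fun p => p.1) _ _
  have hBnodup : ((docInfo.foldl (fun wordCount p =>
      PySem.Dict.insert wordCount p.1 (PySem.Dict.getD wordCount p.1 0 + p.2))
      PySem.Dict.empty).keys).Nodup :=
    PySem.Dict.nodup_keys_foldl_insert_key docInfo (fun p => p.1) _ _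
      (by simp [PySem.Dict.keys_empty])
  rw [PySem.Dict.items_eq_map_keys _ (A_keys_nodup docInfo docInfo) 0,
      PySem.Dict.items_eq_map_keys _ hBnodup 0]
  rw [A_keys, hBkeys]
  apply List.map_congr_left
  intro k hk
  have hkmem : k ∈ docInfo.map (fun p => p.1) := by
    have := (PySem.Set.mem_update (s := (PySem.Dict.empty : PySem.Dict String Int).keys)
      (xs := docInfo.map (fun p => p.1)) (y := k)).mp hk
    simpa [PySem.Dict.keys_empty] using this
  have hA : (docInfo.foldl (fun wordCount el =>
      if !(PySem.Dict.contains wordCount el.1) then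
        PySem.Dict.insert wordCount el.1
          (((docInfo.filter (fun value => value.1 == el.1)).map (fun value => value.2)).sum)
      else wordCount) PySem.Dict.empty).getD k 0 = pvTotal docInfo k := by
    rw [PySem.Dict.getD_eq_get?_getD, A_get?]
    simp [PySem.Dict.contains_empty, hkmem]
  have hB : (docInfo.foldl (fun wordCount p =>
      PySem.Dict.insert wordCount p.1 (PySem.Dict.getD wordCount p.1 0 + p.2))
      PySem.Dict.empty).getD k 0 = pvTotal docInfo k := by
    rw [B_getD]; simp [PySem.Dict.getD_empty]
  simp only [hA, hB]
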